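-- pv_equiv track=rewrite | github.com/jonghoonok/Algorithm_Study | Greedy/Mukbang.py | solution
-- ===== SOURCE A (Python) =====
-- def solution(food_times, K):
--     time = 1
--     while time <= K:
--         i = time % len(food_times)
--         if food_times[i-1]:
--             food_times[i-1] -= 1
--         time += 1
--     result = time % len(food_times)
--     return result
-- ===== SOURCE B (Python) =====
-- def solution(food_times, K):
--     # The loop's decrements never influence the returned value: the final
--     # time is K + 1 (for K >= 0), so the answer is (K + 1) % len(food_times).
--     # Return-value equivalence only: A mutates food_times in place, B does not.
--     return (K + 1) % len(food_times)
-- ===== Notes on version B (the rewrite author's own statement) =====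
-- stated objective: faster
-- what changed: Replaced the O(K) simulation loop (whose list mutations never affect the returned value) with the closed form (K+1) % len(food_times).
-- outside the precondition, e.g. on solution([2, 3], -1): A returns 1, B returns 0
import Mathlib
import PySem

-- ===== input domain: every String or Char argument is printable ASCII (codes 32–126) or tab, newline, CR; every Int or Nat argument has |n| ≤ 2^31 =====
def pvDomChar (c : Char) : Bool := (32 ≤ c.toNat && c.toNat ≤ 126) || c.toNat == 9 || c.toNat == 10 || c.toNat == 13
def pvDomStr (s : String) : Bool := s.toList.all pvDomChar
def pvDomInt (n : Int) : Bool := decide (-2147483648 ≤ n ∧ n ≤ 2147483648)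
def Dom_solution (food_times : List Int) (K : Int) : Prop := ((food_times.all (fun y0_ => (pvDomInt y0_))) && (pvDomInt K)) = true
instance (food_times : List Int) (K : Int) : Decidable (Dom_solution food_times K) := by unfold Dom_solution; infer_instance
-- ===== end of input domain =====

-- B replaces A's O(K) simulation loop by the closed form (K+1) % len(food_times);
-- return-value equivalence only: A mutates food_times in place, B does not.

-- ===== PORT A =====
-- the while loop of A, fuel = number of remaining iterations (K - time + 1);
-- food_times[i-1] truthiness test and in-place decrement kept step for step
def solutionLoopA : Nat → List Int → Int → Int
  | 0, ft, time => PySem.Int.mod time (ft.length : Int)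
  | fuel+1, ft, time =>
      let i := PySem.Int.mod time (ft.length : Int)
      let ft' := if PySem.List.pyGetD ft (i - 1) 0 ≠ 0
                 then PySem.List.pySetD ft (i - 1) (PySem.List.pyGetD ft (i - 1) 0 - 1)
                 else ft
      solutionLoopA fuel ft' (time + 1)

def solution (food_times : List Int) (K : Int) : Int :=
  solutionLoopA K.toNat food_times 1

-- ===== PORT B =====
def solution_alt (food_times : List Int) (K : Int) : Int :=
  PySem.Int.mod (K + 1) (food_times.length : Int)

-- ===== PRECONDITION & SPEC =====
-- Pre_ excludes the empty list (A raises ZeroDivisionError) and negative K,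
-- which is outside the natural domain of a time budget (A's value 1 % len
-- there is an artefact of the loop never running).
def Pre_solution (food_times : List Int) (K : Int) : Prop :=
  food_times ≠ [] ∧ 0 ≤ K
instance (food_times : List Int) (K : Int) : Decidable (Pre_solution food_times K) := by
  unfold Pre_solution; infer_instance
def pvWitness_solution : List Int × Int := ([3, 1, 2], 5)

def Spec_solution (food_times : List Int) (K : Int) (out : Int) : Prop := out = solution_alt food_times K
instance (food_times : List Int) (K : Int) (out : Int) : Decidable (Spec_solution food_times K out) := by unfold Spec_solution; infer_instance

-- ===== CLAIM (what is proved, stated in full; the proofs are below) =====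
def Claim_equal_solution : Prop := ∀ (food_times : List Int) (K : Int), Dom_solution food_times K → Pre_solution food_times K → Spec_solution food_times K (solution food_times K)

-- ===== LEMMAS AND PROOFS =====

-- the loop's list mutations preserve length, so the result is (time + fuel) % len
theorem solutionLoopA_eq (fuel : Nat) :
    ∀ (ft : List Int) (time : Int),
      solutionLoopA fuel ft time = PySem.Int.mod (time + fuel) (ft.length : Int) := by
  induction fuel with
  | zero => intro ft time; simp [solutionLoopA]
  | succ n ih =>
      intro ft time
      simp only [solutionLoopA]
      split
      · rw [ih, PySem.List.length_pySetD]
        push_cast; ring_nf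
      · rw [ih]; push_cast; ring_nf

-- ===== VERDICT (by name: the statement is the Claim_ definition above) =====
theorem solution_spec : Claim_equal_solution := by
  intro ft K _ hpre
  unfold Spec_solution solution solution_alt
  rw [solutionLoopA_eq]
  rw [Int.toNat_of_nonneg hpre.2]
  ring_nf
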